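-- pv_equiv track=rewrite | github.com/YSongxiao/LeetCode | LINE/counter.py | initial
-- ===== SOURCE A (Python) =====
-- def initial(a, prefix, MAXV, n):
--     for v_ in range(1, MAXV+1):
--         for n_ in range(1, n+1):
--             if a[n_-1] % v_ == 0:
--                 prefix[v_-1, n_] = prefix[v_-1, n_-1] + 1
--             else:
--                 prefix[v_-1, n_] = prefix[v_-1, n_-1]
--     return prefix
-- ===== SOURCE B (Python) =====
-- def initial(a, prefix, MAXV, n):
--     # Per column: enumerate the divisors of |a[j]| once (trial division up to sqrt),
--     # then fill each row with a running count instead of a per-cell % test.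
--     if MAXV > 0 and n > 0:
--         cols = []
--         for j in range(n):
--             x = abs(a[j])
--             if x == 0:
--                 cols.append(None)  # 0 is divisible by every v
--             else:
--                 s = set()
--                 d = 1
--                 while d * d <= x:
--                     if x % d == 0:
--                         s.add(d)
--                         s.add(x // d)
--                     d += 1
--                 cols.append(s)
--         for v in range(1, MAXV + 1):
--             cur = prefix[v - 1, 0]
--             for n_ in range(1, n + 1):
--                 c = cols[n_ - 1]
--                 if c is None or v in c:
--                     cur += 1
--                 prefix[v - 1, n_] = cur
--     return prefix
-- ===== Notes on version B (the rewrite author's own statement) =====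
-- stated objective: alternative
-- what changed: Instead of testing a[n_-1] % v for every (v, n_) cell while re-reading the dict, B enumerates the divisors of |a[j]| once per column by trial division up to sqrt (None marking a[j]==0, which every v divides) and then fills each row with a running counter and set lookups.
import Mathlib
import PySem

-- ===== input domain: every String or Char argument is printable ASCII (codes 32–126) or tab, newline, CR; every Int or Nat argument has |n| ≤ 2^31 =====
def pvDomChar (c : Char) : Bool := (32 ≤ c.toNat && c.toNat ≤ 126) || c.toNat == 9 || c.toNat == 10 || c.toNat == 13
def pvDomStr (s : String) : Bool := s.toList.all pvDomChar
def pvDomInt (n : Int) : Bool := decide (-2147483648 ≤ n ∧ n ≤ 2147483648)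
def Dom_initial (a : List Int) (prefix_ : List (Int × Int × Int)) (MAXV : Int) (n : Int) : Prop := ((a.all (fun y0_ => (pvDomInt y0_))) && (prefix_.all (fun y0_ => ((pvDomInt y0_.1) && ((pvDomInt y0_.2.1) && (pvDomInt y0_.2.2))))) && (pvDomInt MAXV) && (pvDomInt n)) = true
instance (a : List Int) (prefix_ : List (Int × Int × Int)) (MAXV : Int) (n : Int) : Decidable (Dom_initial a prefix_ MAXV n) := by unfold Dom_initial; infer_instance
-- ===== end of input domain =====

-- B replaces the per-cell `a[n_-1] % v` test by a per-column divisor enumeration plus a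
-- running row counter (objective: alternative algorithm). Both A and B mutate `prefix`
-- in place in the same write order; the theorem is about the returned association list.

-- ===== PORT A =====
def initial (a : List Int) (prefix_ : List (Int × Int × Int)) (MAXV : Int) (n : Int) : List (Int × Int × Int) :=
  let d0 : PySem.Dict (Int × Int) Int :=
    PySem.Dict.ofList (prefix_.map (fun t => ((t.1, t.2.1), t.2.2)))
  let d :=
    (PySem.List.pyRange 1 (MAXV + 1) 1).foldl (fun d v_ =>
      (PySem.List.pyRange 1 (n + 1) 1).foldl (fun d n_ =>
        if PySem.Int.mod (PySem.List.pyGetD a (n_ - 1) 0) v_ == 0 then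
          d.insert (v_ - 1, n_) (d.getD (v_ - 1, n_ - 1) 0 + 1)
        else
          d.insert (v_ - 1, n_) (d.getD (v_ - 1, n_ - 1) 0)) d) d0
  d.items.map (fun kv => (kv.1.1, kv.1.2, kv.2))

-- ===== PORT B =====
-- B-side helper: the `while d * d <= x` trial-division loop collecting divisors into a set
def pvDivLoop (x : Int) (d : Int) (s : List Int) : List Int :=
  if h : d * d ≤ x then
    pvDivLoop x (d + 1)
      (if PySem.Int.mod x d == 0 then
        PySem.Set.add (PySem.Set.add s d) (PySem.Int.floordiv x d)
      else s)
  else s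
termination_by (x + 1 - d).toNat
decreasing_by
  have h2 : d ≤ d * d := by
    rcases Int.le_total d 0 with hd | hd
    · exact le_trans hd (mul_self_nonneg d)
    · nlinarith
  have h3 : d ≤ x := le_trans h2 h
  omega

def initial_alt (a : List Int) (prefix_ : List (Int × Int × Int)) (MAXV : Int) (n : Int) : List (Int × Int × Int) :=
  let d0 : PySem.Dict (Int × Int) Int :=
    PySem.Dict.ofList (prefix_.map (fun t => ((t.1, t.2.1), t.2.2)))
  let d :=
    if 0 < MAXV ∧ 0 < n then
      let cols : List (Option (List Int)) :=
        (PySem.List.pyRange 0 n 1).map (fun j =>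
          let x := |PySem.List.pyGetD a j 0|
          if x == 0 then none else some (pvDivLoop x 1 []))
      (PySem.List.pyRange 1 (MAXV + 1) 1).foldl (fun d v =>
        ((PySem.List.pyRange 1 (n + 1) 1).foldl
          (fun (p : PySem.Dict (Int × Int) Int × Int) n_ =>
            let cur :=
              match PySem.List.pyGetD cols (n_ - 1) none with
              | none => p.2 + 1
              | some s => if s.contains v then p.2 + 1 else p.2
            (p.1.insert (v - 1, n_) cur, cur))
          (d, d.getD (v - 1, 0) 0)).1) d0
    else d0
  d.items.map (fun kv => (kv.1.1, kv.1.2, kv.2))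

-- ===== PRECONDITION & SPEC =====
-- Pre_ = exactly the inputs on which the Python A returns: when both loops run (MAXV ≥ 1, n ≥ 1),
-- A indexes a[n_-1] for n_ up to n (IndexError if n > len(a)) and reads prefix[(v-1, 0)] for every
-- v in 1..MAXV (KeyError if missing; 'every key (v-1,0) with 0 ≤ v-1 < MAXV is present' is stated
-- as a count of distinct first components so that it is cheap to evaluate).
def Pre_initial (a : List Int) (prefix_ : List (Int × Int × Int)) (MAXV : Int) (n : Int) : Prop :=
  1 ≤ MAXV ∧ 1 ≤ n →
    (n ≤ (a.length : Int) ∧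
      ((((prefix_.filter (fun t => t.2.1 == 0)).map (fun t => t.1)).dedup.filter
          (fun k => decide (0 ≤ k ∧ k < MAXV))).length : Int) = MAXV)
instance (a : List Int) (prefix_ : List (Int × Int × Int)) (MAXV : Int) (n : Int) : Decidable (Pre_initial a prefix_ MAXV n) := by unfold Pre_initial; infer_instance

def pvWitness_initial : List Int × (List (Int × Int × Int)) × Int × Int := ([2], [(0, 0, 0)], 1, 1)

def Spec_initial (a : List Int) (prefix_ : List (Int × Int × Int)) (MAXV : Int) (n : Int) (out : List (Int × Int × Int)) : Prop := out = initial_alt a prefix_ MAXV n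
instance (a : List Int) (prefix_ : List (Int × Int × Int)) (MAXV : Int) (n : Int) (out : List (Int × Int × Int)) : Decidable (Spec_initial a prefix_ MAXV n out) := by unfold Spec_initial; infer_instance

-- ===== CLAIM (what is proved, stated in full; the proofs are below) =====
def Claim_equal_initial : Prop := ∀ (a : List Int) (prefix_ : List (Int × Int × Int)) (MAXV : Int) (n : Int), Dom_initial a prefix_ MAXV n → Pre_initial a prefix_ MAXV n → Spec_initial a prefix_ MAXV n (initial a prefix_ MAXV n)

-- ===== LEMMAS AND PROOFS =====

lemma pvFoldlFixed {α β : Type} (l : List β) (init : α) :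
    l.foldl (fun d _ => d) init = init := by
  induction l generalizing init with
  | nil => rfl
  | cons x t ih => exact ih init

-- membership invariant of the trial-division loop
lemma pvDivLoop_mem (y v : Int) :
    ∀ (k : Nat) (d : Int) (s : List Int), (y + 1 - d).toNat = k → 1 ≤ d →
      (v ∈ pvDivLoop y d s ↔
        v ∈ s ∨ ∃ e : Int, d ≤ e ∧ e * e ≤ y ∧ e ∣ y ∧ (v = e ∨ v = y / e)) := by
  intro k
  induction k with
  | zero =>
    intro d s hk hd
    have hdd : ¬ (d * d ≤ y) := by
      intro hdd
      have hd2 : d ≤ d * d := by nlinarith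
      omega
    rw [pvDivLoop, dif_neg hdd]
    constructor
    · exact Or.inl
    · rintro (hs | ⟨e, he1, he2, _, _⟩)
      · exact hs
      · exfalso; nlinarith
  | succ k ih =>
    intro d s hk hd
    by_cases hdd : d * d ≤ y
    · have hdy : d ≤ y := by nlinarith
      rw [pvDivLoop, dif_pos hdd]
      rw [ih (d + 1) _ (by omega) (by omega)]
      by_cases hm : PySem.Int.mod y d == 0
      · have hdvd : d ∣ y := (PySem.Int.mod_eq_zero_iff_dvd y d).mp (by simpa using hm)
        rw [if_pos hm, PySem.Int.floordiv_eq_ediv_of_pos (by omega : (0:Int) < d)]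
        simp only [PySem.Set.mem_add]
        constructor
        · rintro (((hs | h1) | h2) | he)
          · exact Or.inl hs
          · exact Or.inr ⟨d, le_refl d, hdd, hdvd, Or.inl h1⟩
          · exact Or.inr ⟨d, le_refl d, hdd, hdvd, Or.inr h2⟩
          · obtain ⟨e, he1, he2, he3, he4⟩ := he
            exact Or.inr ⟨e, by omega, he2, he3, he4⟩
        · rintro (hs | ⟨e, he1, he2, he3, he4⟩)
          · exact Or.inl (Or.inl (Or.inl hs))
          · by_cases hed : e = d
            · subst hed
              rcases he4 with h | h
              · exact Or.inl (Or.inl (Or.inr h))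
              · exact Or.inl (Or.inr h)
            · exact Or.inr ⟨e, by omega, he2, he3, he4⟩
      · have hdvd : ¬ d ∣ y := fun h => hm (by simp [(PySem.Int.mod_eq_zero_iff_dvd y d).mpr h])
        rw [if_neg hm]
        constructor
        · rintro (hs | ⟨e, he1, he2, he3, he4⟩)
          · exact Or.inl hs
          · exact Or.inr ⟨e, by omega, he2, he3, he4⟩
        · rintro (hs | ⟨e, he1, he2, he3, he4⟩)
          · exact Or.inl hs
          · by_cases hed : e = d
            · exact absurd (hed ▸ he3) hdvd
            · exact Or.inr ⟨e, by omega, he2, he3, he4⟩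
    · rw [pvDivLoop, dif_neg hdd]
      constructor
      · exact Or.inl
      · rintro (hs | ⟨e, he1, he2, _, _⟩)
        · exact hs
        · exfalso; nlinarith

lemma pvMemDivLoop_iff (y v : Int) (hy : 1 ≤ y) (hv : 1 ≤ v) :
    v ∈ pvDivLoop y 1 [] ↔ v ∣ y := by
  rw [pvDivLoop_mem y v (y + 1 - 1).toNat 1 [] rfl (le_refl 1)]
  simp only [List.not_mem_nil, false_or]
  constructor
  · rintro ⟨e, he1, he2, he3, hve⟩
    rcases hve with rfl | rfl
    · exact he3
    · obtain ⟨c, rfl⟩ := he3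
      rw [Int.mul_ediv_cancel_left c (by omega : e ≠ 0)]
      exact ⟨e, mul_comm e c⟩
  · intro hvd
    by_cases hvv : v * v ≤ y
    · exact ⟨v, hv, hvv, hvd, Or.inl rfl⟩
    · obtain ⟨c, rfl⟩ := hvd
      have hc1 : 1 ≤ c := by nlinarith
      have hcv : c < v := by nlinarith
      refine ⟨c, hc1, by nlinarith, ⟨v, mul_comm v c⟩, Or.inr ?_⟩
      rw [mul_comm v c, Int.mul_ediv_cancel_left v (by omega : c ≠ 0)]

-- the per-cell test of B (divisor-set lookup in the cols table) equals A's `a[m-1] % v == 0`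
lemma pvTest (a : List Int) (n v m : Int) (hv : 1 ≤ v) (h1 : 1 ≤ m) (h2 : m ≤ n) (z : Int) :
    (match PySem.List.pyGetD ((PySem.List.pyRange 0 n 1).map (fun j =>
        let x := |PySem.List.pyGetD a j 0|
        if x == 0 then none else some (pvDivLoop x 1 []))) (m - 1) none with
      | none => z + 1
      | some s => if s.contains v then z + 1 else z)
    = (if PySem.Int.mod (PySem.List.pyGetD a (m - 1) 0) v == 0 then z + 1 else z) := by
  rw [PySem.List.pyGetD_map_pyRange_of_nonneg _ n (m - 1) none (by omega) (by omega)]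
  by_cases hx : PySem.List.pyGetD a (m - 1) 0 = 0
  · rw [hx]
    have h0 : PySem.Int.mod 0 v = 0 := (PySem.Int.mod_eq_zero_iff_dvd 0 v).mpr (dvd_zero v)
    simp [h0]
  · have hy : 1 ≤ |PySem.List.pyGetD a (m - 1) 0| := by
      rcases abs_pos.mpr hx with h
      omega
    have habs : ¬ (|PySem.List.pyGetD a (m - 1) 0| == 0) = true := by
      simp [abs_eq_zero, hx]
    simp only [if_neg habs]
    have hcont : (pvDivLoop |PySem.List.pyGetD a (m - 1) 0| 1 []).contains v
        = (PySem.Int.mod (PySem.List.pyGetD a (m - 1) 0) v == 0) := by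
      by_cases hdvd : v ∣ PySem.List.pyGetD a (m - 1) 0
      · have h1 : v ∈ pvDivLoop |PySem.List.pyGetD a (m - 1) 0| 1 [] :=
          (pvMemDivLoop_iff _ v hy hv).mpr ((dvd_abs v _).mpr hdvd)
        have h2 : PySem.Int.mod (PySem.List.pyGetD a (m - 1) 0) v = 0 :=
          (PySem.Int.mod_eq_zero_iff_dvd _ v).mpr hdvd
        simp [h2, h1]
      · have h1 : v ∉ pvDivLoop |PySem.List.pyGetD a (m - 1) 0| 1 [] := by
          intro hmem
          exact hdvd ((dvd_abs v _).mp ((pvMemDivLoop_iff _ v hy hv).mp hmem))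
        have h2 : PySem.Int.mod (PySem.List.pyGetD a (m - 1) 0) v ≠ 0 := by
          intro h
          exact hdvd ((PySem.Int.mod_eq_zero_iff_dvd _ v).mp h)
        simp [h1, h2]
    simp only [hcont]

-- the inner n_-loop: A's dict-reading fold equals B's (dict, running counter) fold
lemma pvInner (a : List Int) (n v : Int) (hv : 1 ≤ v) :
    ∀ (k : Nat) (m : Int) (d : PySem.Dict (Int × Int) Int) (cur : Int),
      (n + 1 - m).toNat = k → 1 ≤ m → d.getD (v - 1, m - 1) 0 = cur →
      (PySem.List.pyRange m (n + 1) 1).foldl (fun d n_ =>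
        if PySem.Int.mod (PySem.List.pyGetD a (n_ - 1) 0) v == 0 then
          d.insert (v - 1, n_) (d.getD (v - 1, n_ - 1) 0 + 1)
        else
          d.insert (v - 1, n_) (d.getD (v - 1, n_ - 1) 0)) d
      = ((PySem.List.pyRange m (n + 1) 1).foldl
          (fun (p : PySem.Dict (Int × Int) Int × Int) n_ =>
            let cur :=
              match PySem.List.pyGetD ((PySem.List.pyRange 0 n 1).map (fun j =>
                  let x := |PySem.List.pyGetD a j 0|
                  if x == 0 then none else some (pvDivLoop x 1 []))) (n_ - 1) none with
              | none => p.2 + 1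
              | some s => if s.contains v then p.2 + 1 else p.2
            (p.1.insert (v - 1, n_) cur, cur)) (d, cur)).1 := by
  intro k
  induction k with
  | zero =>
    intro m d cur hk hm hcur
    rw [PySem.List.pyRange_one_eq_nil (by omega : n + 1 ≤ m)]
    rfl
  | succ k ih =>
    intro m d cur hk hm hcur
    rw [PySem.List.pyRange_one_cons (by omega : m < n + 1)]
    simp only [List.foldl_cons]
    rw [pvTest a n v m hv (by omega) (by omega) cur]
    have hstep :
        (if PySem.Int.mod (PySem.List.pyGetD a (m - 1) 0) v == 0 then
          d.insert (v - 1, m) (d.getD (v - 1, m - 1) 0 + 1)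
        else
          d.insert (v - 1, m) (d.getD (v - 1, m - 1) 0))
        = d.insert (v - 1, m)
            (if PySem.Int.mod (PySem.List.pyGetD a (m - 1) 0) v == 0 then cur + 1 else cur) := by
      rw [hcur]
      split <;> rfl
    rw [hstep]
    exact ih (m + 1) _ _ (by omega) (by omega)
      (by rw [show m + 1 - 1 = m by ring]; exact PySem.Dict.getD_insert_self d (v - 1, m) _ 0)

lemma pvCore (a : List Int) (prefix_ : List (Int × Int × Int)) (MAXV : Int) (n : Int) :
    initial a prefix_ MAXV n = initial_alt a prefix_ MAXV n := by
  by_cases h : 0 < MAXV ∧ 0 < n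
  · simp only [initial, initial_alt, if_pos h]
    refine congrArg (fun d : PySem.Dict (Int × Int) Int => d.items.map (fun kv => (kv.1.1, kv.1.2, kv.2))) ?_
    apply PySem.List.foldl_congr_mem
    intro acc v hvmem
    have hv : 1 ≤ v := (PySem.List.mem_pyRange_one.mp hvmem).1
    exact pvInner a n v hv (n + 1 - 1).toNat 1 acc (acc.getD (v - 1, 0) 0) rfl (le_refl 1)
      (by norm_num)
  · simp only [initial, initial_alt, if_neg h]
    rcases lt_or_ge 0 MAXV with hM | hM
    · have hn : n ≤ 0 := by
        by_contra hn
        exact h ⟨hM, by omega⟩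
      rw [PySem.List.pyRange_one_eq_nil (by omega : n + 1 ≤ 1)]
      simp only [List.foldl_nil]
      rw [pvFoldlFixed]
    · rw [PySem.List.pyRange_one_eq_nil (by omega : MAXV + 1 ≤ 1)]
      simp only [List.foldl_nil]

-- ===== VERDICT (by name: the statement is the Claim_ definition above) =====
theorem initial_spec : Claim_equal_initial := by
  intro a prefix_ MAXV n _ _
  unfold Spec_initial
  exact pvCore a prefix_ MAXV n
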